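-- pv_equiv track=rewrite | github.com/czneal/SEC | fts/srch.py | find_snippet
-- ===== SOURCE A (Python) =====
-- from typing import List, Dict, Union, Any, cast, Tuple, Iterable
--
-- def find_snippet(
--         tokens: Iterable[str],
--         text: List[str],
--         frame_size: int) -> str:
--     tks = set([t.lower() for t in tokens])
--
--     # (frame_end, word_count, frame_start)
--     best_match: Tuple[int, int, int] = (-1, 0, -1)
--     tokens_in_frame: Dict[str, int] = {}
--
--     for i, w in enumerate(text):
--         if w.lower() in tks:
--             tokens_in_frame[w.lower()] = i
--
--         to_remove = [(k, v) for k, v in tokens_in_frame.items()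
--                      if v < i - frame_size]
--         for t, t_i in to_remove:
--             if t_i < i - frame_size:
--                 tokens_in_frame.pop(t)
--
--         if len(tokens_in_frame) > best_match[1]:
--             best_match = (
--                 i, len(tokens_in_frame), min(
--                     tokens_in_frame.values()))
--
--     if best_match[0] != -1:
--         middle = int((best_match[0] + best_match[2]) / 2)
--         left = int(frame_size / 2)
--         return ' '.join(text[middle - left: middle + left])
--
--     return ''
-- ===== SOURCE B (Python) =====
-- def find_snippet(tokens, text, frame_size):
--     tks = set(t.lower() for t in tokens)
--     if frame_size < 0:
--         return ''
--     # one pass: sliding-window counter of query tokens -> distinct count per position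
--     counts = {}
--     distinct = 0
--     best_i = -1
--     best_count = 0
--     for i, w in enumerate(text):
--         lw = w.lower()
--         if lw in tks:
--             counts[lw] = counts.get(lw, 0) + 1
--             if counts[lw] == 1:
--                 distinct += 1
--         j = i - frame_size - 1
--         if j >= 0:
--             lj = text[j].lower()
--             if lj in tks:
--                 counts[lj] -= 1
--                 if counts[lj] == 0:
--                     distinct -= 1
--         if distinct > best_count:
--             best_i = i
--             best_count = distinct
--     if best_i == -1:
--         return ''
--     # single backward scan over the winning window: min of the last occurrences
--     lo = best_i - frame_size
--     if lo < 0: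
--         lo = 0
--     seen = set()
--     min_last = best_i
--     for j in range(best_i, lo - 1, -1):
--         lj = text[j].lower()
--         if lj in tks and lj not in seen:
--             seen.add(lj)
--             min_last = j
--     middle = (best_i + min_last) // 2
--     left = frame_size // 2
--     return ' '.join(text[middle - left: middle + left])
-- ===== Notes on version B (the rewrite author's own statement) =====
-- stated objective: faster
-- what changed: Replaces the per-position dict rescan (rebuilding the stale list and re-taking min over all tracked tokens every step) with an O(n) sliding-window occurrence counter that maintains the distinct count incrementally, plus one backward scan over only the winning window to recover the min last-occurrence.
import Mathlib
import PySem

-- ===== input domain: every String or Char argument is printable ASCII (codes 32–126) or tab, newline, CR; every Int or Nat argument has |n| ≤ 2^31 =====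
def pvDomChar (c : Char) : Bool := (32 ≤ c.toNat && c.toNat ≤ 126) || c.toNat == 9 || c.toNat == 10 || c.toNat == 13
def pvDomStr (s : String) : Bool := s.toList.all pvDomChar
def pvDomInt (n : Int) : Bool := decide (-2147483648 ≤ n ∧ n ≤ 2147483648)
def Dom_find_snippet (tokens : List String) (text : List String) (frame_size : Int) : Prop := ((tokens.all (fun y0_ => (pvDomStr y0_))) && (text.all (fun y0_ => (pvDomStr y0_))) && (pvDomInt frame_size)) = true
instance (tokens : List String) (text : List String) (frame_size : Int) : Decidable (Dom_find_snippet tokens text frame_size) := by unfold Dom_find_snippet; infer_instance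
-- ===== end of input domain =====

-- B replaces A's per-step dict rescan with a one-pass sliding-window counter (objective: faster).
-- ===== PORT A =====
def find_snippet (tokens : List String) (text : List String) (frame_size : Int) : String :=
  let tks : PySem.Set String := PySem.Set.ofList (tokens.map PySem.Str.lower)
  let res := (PySem.List.enumerate text).foldl
    (fun (st : (Int × Int × Int) × PySem.Dict String Int) iw =>
      let best := st.1
      let i := iw.1
      let w := iw.2
      let d := if PySem.Set.contains tks (PySem.Str.lower w)
               then st.2.insert (PySem.Str.lower w) i else st.2
      let to_remove := d.items.filter (fun kv => decide (kv.2 < i - frame_size))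
      let d := to_remove.foldl (fun d kv => if kv.2 < i - frame_size then d.erase kv.1 else d) d
      if best.2.1 < (d.size : Int) then
        -- min(values) is guarded by size > best[1] >= 0, so values is nonempty; .getD 0 is unreachable
        ((i, (d.size : Int), ((PySem.List.min? d.values (fun v => v)).getD 0)), d)
      else (best, d))
    ((-1, 0, -1), PySem.Dict.empty)
  let best := res.1
  if best.1 != -1 then
    let middle := PySem.Int.truncdiv (best.1 + best.2.2) 2
    let left := PySem.Int.truncdiv frame_size 2
    PySem.Str.join " " (PySem.List.slice text (some (middle - left)) (some (middle + left)))
  else ""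

-- ===== PORT B =====
def find_snippet_alt (tokens : List String) (text : List String) (frame_size : Int) : String :=
  let tks : PySem.Set String := PySem.Set.ofList (tokens.map PySem.Str.lower)
  if frame_size < 0 then "" else
  let res := (PySem.List.enumerate text).foldl
    (fun (st : PySem.Dict String Int × Int × Int × Int) iw =>
      let i := iw.1
      let lw := PySem.Str.lower iw.2
      let s1 :=
        if PySem.Set.contains tks lw then
          let cnts := st.1.insert lw (st.1.getD lw 0 + 1)
          (cnts, if cnts.getD lw 0 == 1 then st.2.1 + 1 else st.2.1)
        else (st.1, st.2.1)
      let j := i - frame_size - 1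
      let s2 :=
        if 0 ≤ j then
          -- 0 <= j < i < len(text), so pyGet? is always some; .getD "" is unreachable
          let lj := PySem.Str.lower ((PySem.List.pyGet? text j).getD "")
          if PySem.Set.contains tks lj then
            let cnts := s1.1.insert lj (s1.1.getD lj 0 - 1)
            (cnts, if cnts.getD lj 0 == 0 then s1.2 - 1 else s1.2)
          else s1
        else s1
      if st.2.2.2 < s2.2 then (s2.1, s2.2, i, s2.2) else (s2.1, s2.2, st.2.2.1, st.2.2.2))
    (PySem.Dict.empty, 0, -1, 0)
  let best_i := res.2.2.1
  if best_i == -1 then "" else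
  let lo := if best_i - frame_size < 0 then 0 else best_i - frame_size
  let scan := (PySem.List.pyRange best_i (lo - 1) (-1)).foldl
    (fun (st : PySem.Set String × Int) j =>
      let lj := PySem.Str.lower ((PySem.List.pyGet? text j).getD "")
      if PySem.Set.contains tks lj && !(PySem.Set.contains st.1 lj) then
        (PySem.Set.add st.1 lj, j)
      else st)
    (PySem.Set.empty, best_i)
  let middle := PySem.Int.floordiv (best_i + scan.2) 2
  let left := PySem.Int.floordiv frame_size 2
  PySem.Str.join " " (PySem.List.slice text (some (middle - left)) (some (middle + left)))

-- ===== PRECONDITION & SPEC =====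
def Spec_find_snippet (tokens : List String) (text : List String) (frame_size : Int) (out : String) : Prop := out = find_snippet_alt tokens text frame_size
instance (tokens : List String) (text : List String) (frame_size : Int) (out : String) : Decidable (Spec_find_snippet tokens text frame_size out) := by unfold Spec_find_snippet; infer_instance

-- ===== CLAIM (what is proved, stated in full; the proofs are below) =====
def Claim_equal_find_snippet : Prop := ∀ (tokens : List String) (text : List String) (frame_size : Int), Dom_find_snippet tokens text frame_size → Spec_find_snippet tokens text frame_size (find_snippet tokens text frame_size)


-- ===== LEMMAS AND PROOFS =====

-- proof-side abbreviations (B-step semantics): window after m processed words, last occurrence, distinct present tokens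
def pvLows (text : List String) : List String := text.map PySem.Str.lower

def pvWin (lows : List String) (F m : Nat) : List String := (lows.take m).drop (m - (F+1))

def pvLastO (lows : List String) (t : String) (m : Nat) : Nat :=
  (List.range m).foldl (fun acc j => if lows.getD j "" = t then j else acc) 0

def pvPres (tks lows : List String) (F m : Nat) : List String :=
  tks.filter (fun t => (pvWin lows F m).contains t)

def pvMinD (l : List Int) (d : Int) : Int := (PySem.List.min? l (fun v => v)).getD d

def pvMinL (tks lows : List String) (F m : Nat) : Int :=
  pvMinD ((pvPres tks lows F m).map (fun t => ((pvLastO lows t m : Nat) : Int))) 0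

-- the two loop bodies, named (definitionally equal to the lambdas in the ports)
def pvStepA (tks : PySem.Set String) (frame_size : Int)
    (st : (Int × Int × Int) × PySem.Dict String Int) (iw : Int × String) :
    (Int × Int × Int) × PySem.Dict String Int :=
  let best := st.1
  let i := iw.1
  let w := iw.2
  let d := if PySem.Set.contains tks (PySem.Str.lower w)
           then st.2.insert (PySem.Str.lower w) i else st.2
  let to_remove := d.items.filter (fun kv => decide (kv.2 < i - frame_size))
  let d := to_remove.foldl (fun d kv => if kv.2 < i - frame_size then d.erase kv.1 else d) d
  if best.2.1 < (d.size : Int) then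
    ((i, (d.size : Int), ((PySem.List.min? d.values (fun v => v)).getD 0)), d)
  else (best, d)

def pvStepB (tks : PySem.Set String) (frame_size : Int) (text : List String)
    (st : PySem.Dict String Int × Int × Int × Int) (iw : Int × String) :
    PySem.Dict String Int × Int × Int × Int :=
  let i := iw.1
  let lw := PySem.Str.lower iw.2
  let s1 :=
    if PySem.Set.contains tks lw then
      let cnts := st.1.insert lw (st.1.getD lw 0 + 1)
      (cnts, if cnts.getD lw 0 == 1 then st.2.1 + 1 else st.2.1)
    else (st.1, st.2.1)
  let j := i - frame_size - 1
  let s2 :=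
    if 0 ≤ j then
      let lj := PySem.Str.lower ((PySem.List.pyGet? text j).getD "")
      if PySem.Set.contains tks lj then
        let cnts := s1.1.insert lj (s1.1.getD lj 0 - 1)
        (cnts, if cnts.getD lj 0 == 0 then s1.2 - 1 else s1.2)
      else s1
    else s1
  if st.2.2.2 < s2.2 then (s2.1, s2.2, i, s2.2) else (s2.1, s2.2, st.2.2.1, st.2.2.2)

def pvScanStep (tks : PySem.Set String) (text : List String)
    (st : PySem.Set String × Int) (j : Int) : PySem.Set String × Int :=
  let lj := PySem.Str.lower ((PySem.List.pyGet? text j).getD "")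
  if PySem.Set.contains tks lj && !(PySem.Set.contains st.1 lj) then
    (PySem.Set.add st.1 lj, j)
  else st

-- combined simulation invariant after m words processed
def pvInv (tks lows : List String) (fs : Int) (m : Nat)
    (sA : (Int × Int × Int) × PySem.Dict String Int)
    (sB : PySem.Dict String Int × Int × Int × Int) : Prop :=
  sA.2.keys.Nodup ∧
  (∀ t v, sA.2.get? t = some v ↔
      (t ∈ tks ∧ (pvWin lows fs.toNat m).contains t = true ∧ v = ((pvLastO lows t m : Nat) : Int))) ∧
  (∀ t, t ∈ tks → sB.1.getD t 0 = (((pvWin lows fs.toNat m).count t : Nat) : Int)) ∧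
  sB.2.1 = ((pvPres tks lows fs.toNat m).length : Int) ∧
  sA.1.1 = sB.2.2.1 ∧ sA.1.2.1 = sB.2.2.2 ∧
  ((sB.2.2.1 = -1 ∧ sB.2.2.2 = 0 ∧ sA.1.2.2 = -1) ∨
   (∃ mb : Nat, mb < m ∧ sB.2.2.1 = (mb : Int) ∧
      sB.2.2.2 = ((pvPres tks lows fs.toNat (mb+1)).length : Int) ∧
      0 < (pvPres tks lows fs.toNat (mb+1)).length ∧
      sA.1.2.2 = pvMinL tks lows fs.toNat (mb+1)))

-- enumerate as an indexed range
theorem pv_enum_eq {α : Type} [Inhabited α] (xs : List α) (s : Int) :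
    PySem.List.enumerate xs s = (List.range xs.length).map (fun (j : Nat) => (s + (j : Int), xs.getD j default)) := by
  induction xs generalizing s with
  | nil => simp [PySem.List.enumerate]
  | cons x t ih =>
    rw [show PySem.List.enumerate (x :: t) s = (s, x) :: PySem.List.enumerate t (s+1) from rfl]
    rw [ih (s+1)]
    simp only [List.length_cons, List.range_succ_eq_map, List.map_cons, List.map_map]
    refine List.cons_eq_cons.mpr ⟨by simp, ?_⟩
    apply List.map_congr_left
    intro j hj
    simp [Function.comp]
    omega


-- countP changes only at one token
theorem pv_countP_delta (l : List String) (p q : String → Bool) (x : String)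
    (hnd : l.Nodup) (hx : x ∈ l) (h : ∀ t ∈ l, t ≠ x → p t = q t) :
    ((l.countP q : Nat) : Int) = ((l.countP p : Nat) : Int)
      + (if q x then 1 else 0) - (if p x then 1 else 0) := by
  have hperm : l.Perm (x :: l.erase x) := List.perm_cons_erase hx
  have hxer : x ∉ l.erase x := (List.Nodup.mem_erase_iff hnd).not.mpr (by simp)
  have hrest : ∀ a ∈ l.erase x, p a = q a := by
    intro a ha
    have hal : a ∈ l := List.mem_of_mem_erase ha
    have hax : a ≠ x := by rintro rfl; exact hxer ha
    exact h a hal hax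
  rw [hperm.countP_eq q, hperm.countP_eq p]
  rw [List.countP_cons, List.countP_cons]
  rw [show (l.erase x).countP q = (l.erase x).countP p from
    List.countP_congr (by intro a ha; simp [hrest a ha])]
  push_cast
  split_ifs <;> simp_all


-- erasing a list of keys filters the items
theorem pv_foldl_erase_items (ks : List String) (d : PySem.Dict String Int) :
    (ks.foldl PySem.Dict.erase d).items = d.items.filter (fun p => !(ks.contains p.1)) := by
  induction ks generalizing d with
  | nil => simp
  | cons k ks ih =>
    rw [List.foldl_cons, ih]
    show ((PySem.Dict.erase d k).items).filter _ = _
    rw [show (PySem.Dict.erase d k).items = d.items.filter (fun p => !(p.1 == k)) from rfl]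
    rw [List.filter_filter]
    apply List.filter_congr
    intro p _
    simp [Bool.not_or, Bool.and_comm]
    rfl


-- minimum under permutation
theorem pv_minD_perm (l₁ l₂ : List Int) (d : Int) (h : l₁.Perm l₂) : pvMinD l₁ d = pvMinD l₂ d := by
  rcases hl : PySem.List.min? l₁ (fun v => v) with _ | v₁
  · have : l₁ = [] := (PySem.List.min?_eq_none_iff _ _).mp hl
    subst this
    have : l₂ = [] := h.symm.eq_nil
    subst this
    rfl
  · have hne₂ : l₂ ≠ [] := by
      intro hnil; subst hnil
      have : l₁ = [] := h.eq_nil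
      subst this; simp [PySem.List.min?] at hl
    rcases hl₂ : PySem.List.min? l₂ (fun v => v) with _ | v₂
    · exact absurd ((PySem.List.min?_eq_none_iff _ _).mp hl₂) hne₂
    · have h₁m : v₁ ∈ l₁ := PySem.List.min?_mem hl
      have h₂m : v₂ ∈ l₂ := PySem.List.min?_mem hl₂
      have h₁min := PySem.List.min?_isMin hl
      have h₂min := PySem.List.min?_isMin hl₂
      have hv12 : v₁ ≤ v₂ := h₁min v₂ (h.mem_iff.mpr h₂m)
      have hv21 : v₂ ≤ v₁ := h₂min v₁ (h.mem_iff.mp h₁m)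
      simp [pvMinD, hl, hl₂]
      omega


theorem pv_minD_eq_of_mem_of_le (l : List Int) (d j : Int) (hj : j ∈ l) (h : ∀ y ∈ l, j ≤ y) :
    pvMinD l d = j := by
  rcases hl : PySem.List.min? l (fun v => v) with _ | v
  · have : l = [] := (PySem.List.min?_eq_none_iff _ _).mp hl
    subst this; simp at hj
  · have hvm : v ∈ l := PySem.List.min?_mem hl
    have hmin := PySem.List.min?_isMin hl
    have h1 : j ≤ v := h v hvm
    have h2 : v ≤ j := hmin j hj
    simp [pvMinD, hl]
    omega


theorem pv_minD_default (l : List Int) (d d' : Int) (h : l ≠ []) : pvMinD l d = pvMinD l d' := by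
  rcases hl : PySem.List.min? l (fun v => v) with _ | v
  · exact absurd ((PySem.List.min?_eq_none_iff _ _).mp hl) h
  · simp [pvMinD, hl]


theorem pv_minD_nonneg (l : List Int) (h : ∀ y ∈ l, 0 ≤ y) : 0 ≤ pvMinD l 0 := by
  rcases hl : PySem.List.min? l (fun v => v) with _ | v
  · simp [pvMinD, hl]
  · have := h v (PySem.List.min?_mem hl)
    simp [pvMinD, hl]
    omega


-- last-occurrence spec
theorem pv_lastO_succ (lows : List String) (t : String) (m : Nat) :
    pvLastO lows t (m+1) = if lows.getD m "" = t then m else pvLastO lows t m := by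
  simp [pvLastO, List.range_succ]


theorem pv_lastO_spec (lows : List String) (t : String) (m : Nat) (h : t ∈ lows.take m) :
    lows.getD (pvLastO lows t m) "" = t ∧ pvLastO lows t m < m ∧
      (∀ j < m, lows.getD j "" = t → j ≤ pvLastO lows t m) := by
  induction m with
  | zero => simp at h
  | succ m ih =>
    rw [pv_lastO_succ]
    by_cases hx : lows.getD m "" = t
    · rw [if_pos hx]
      refine ⟨hx, by omega, ?_⟩
      intro j hj _
      omega
    · rw [if_neg hx]
      have ht : t ∈ lows.take m := by
        rcases List.mem_iff_getElem.mp h with ⟨idx, hidx, hval⟩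
        have hidx' : idx < min (m+1) lows.length := by simpa using hidx
        have hvl : lows[idx]'(by omega) = t := by
          rw [← hval]; exact (List.getElem_take).symm
        have hne : idx ≠ m := by
          intro hh; subst hh
          exact hx (by rw [List.getD_eq_getElem lows "" (by omega)]; exact hvl)
        apply List.mem_iff_getElem.mpr
        exact ⟨idx, by simp; omega, by rw [← hvl]; exact List.getElem_take⟩
      obtain ⟨h1, h2, h3⟩ := ih ht
      refine ⟨h1, by omega, ?_⟩
      intro j hj hv
      rcases Nat.lt_succ_iff_lt_or_eq.mp hj with hlt | hEq
      · exact h3 j hlt hv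
      · subst hEq; exact absurd hv hx


-- window membership characterised by the last occurrence
theorem pv_drop_take_mem (lows : List String) (m k : Nat) (t : String) (hm : m ≤ lows.length) :
    t ∈ (lows.take m).drop k ↔
      (t ∈ lows.take m ∧ k ≤ pvLastO lows t m) := by
  constructor
  · intro hmem
    have hsub : t ∈ lows.take m := List.mem_of_mem_drop hmem
    refine ⟨hsub, ?_⟩
    rcases List.mem_iff_getElem.mp hmem with ⟨idx, hidx, hval⟩
    have hlen : (lows.take m).length = m := by simp; omega
    have hidx' : k + idx < m := by
      have := hidx; simp [hlen] at this; omega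
    have hval' : lows.getD (k + idx) "" = t := by
      rw [List.getD_eq_getElem lows "" (by omega)]
      rw [← hval, List.getElem_drop]
      exact (List.getElem_take).symm
    have := (pv_lastO_spec lows t m hsub).2.2 (k + idx) hidx' hval'
    omega
  · rintro ⟨hsub, hge⟩
    obtain ⟨h1, h2, _⟩ := pv_lastO_spec lows t m hsub
    apply List.mem_iff_getElem.mpr
    have hlen : (lows.take m).length = m := by simp; omega
    refine ⟨pvLastO lows t m - k, by simp [hlen]; omega, ?_⟩
    rw [List.getElem_drop]
    have harg : k + (pvLastO lows t m - k) = pvLastO lows t m := by omega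
    rw [← List.getD_eq_getElem (lows.take m) ""]
    · rw [harg]
      rw [List.getD_eq_getElem (lows.take m) "" (by simp [hlen]; omega)]
      rw [show (lows.take m)[pvLastO lows t m]'(by simp [hlen]; omega) = lows[pvLastO lows t m]'(by omega) from List.getElem_take]
      rw [← List.getD_eq_getElem lows "" (by omega)]
      exact h1

-- window membership characterised by the last occurrence
theorem pv_win_mem_iff (lows : List String) (F m : Nat) (t : String) (hm : m ≤ lows.length) :
    (pvWin lows F m).contains t = true ↔
      (t ∈ lows.take m ∧ m - (F+1) ≤ pvLastO lows t m) := by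
  rw [List.contains_iff_mem]
  exact pv_drop_take_mem lows m (m - (F+1)) t hm

-- window structural step
theorem pv_win_succ_le (lows : List String) (F m : Nat) (hm : m < lows.length) (hle : m ≤ F) :
    pvWin lows F (m+1) = pvWin lows F m ++ [lows.getD m ""] := by
  unfold pvWin
  have h0 : m + 1 - (F+1) = 0 := by omega
  have h0' : m - (F+1) = 0 := by omega
  rw [h0, h0']
  simp only [List.drop_zero]
  rw [List.take_succ]
  congr 1
  rw [List.getElem?_eq_getElem hm]
  simp [List.getD, List.getElem?_eq_getElem hm]


theorem pv_win_succ_gt (lows : List String) (F m : Nat) (hm : m < lows.length) (hgt : F < m) :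
    pvWin lows F (m+1) = (pvWin lows F m).tail ++ [lows.getD m ""] ∧
      pvWin lows F m = lows.getD (m - (F+1)) "" :: (pvWin lows F m).tail := by
  unfold pvWin
  have hk : m - (F+1) < m := by omega
  have hlen : (lows.take m).length = m := by simp; omega
  have htake : lows.take (m+1) = lows.take m ++ [lows.getD m ""] := by
    rw [List.take_succ]
    congr 1
    rw [List.getElem?_eq_getElem hm]
    simp [List.getD, List.getElem?_eq_getElem hm]
  constructor
  · rw [htake]
    rw [List.drop_append_of_le_length (by omega)]
    congr 1
    have h1 : m + 1 - (F+1) = (m - (F+1)) + 1 := by omega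
    rw [h1]
    rw [← List.drop_drop]
    exact List.drop_one
  · rw [List.drop_eq_getElem_cons (by omega : m - (F+1) < (lows.take m).length)]
    congr 1
    · rw [show (lows.take m)[m - (F+1)]'(by omega) = lows[m - (F+1)]'(by omega) from List.getElem_take]
      rw [← List.getD_eq_getElem lows "" (by omega)]



theorem pv_lows_getD (text : List String) (q : Nat) (hq : q < text.length) :
    (pvLows text).getD q "" = PySem.Str.lower (text.getD q "") := by
  unfold pvLows
  rw [List.getD_eq_getElem _ "" (by simpa using hq), List.getElem_map, List.getD_eq_getElem _ "" hq]

-- pruning the stale entries: characterisation of get? after the erase loop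
theorem pv_prune (c : Int) (d : PySem.Dict String Int) (hnd : d.keys.Nodup) :
    ((d.items.filter (fun kv => decide (kv.2 < c))).foldl
        (fun d kv => if kv.2 < c then d.erase kv.1 else d) d).keys.Nodup ∧
    (∀ t v, ((d.items.filter (fun kv => decide (kv.2 < c))).foldl
        (fun d kv => if kv.2 < c then d.erase kv.1 else d) d).get? t = some v ↔
      (d.get? t = some v ∧ ¬(v < c))) := by
  have h1 : (d.items.filter (fun kv => decide (kv.2 < c))).foldl
      (fun d kv => if kv.2 < c then d.erase kv.1 else d) d
      = (d.items.filter (fun kv => decide (kv.2 < c))).foldl (fun d kv => d.erase kv.1) d := by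
    apply PySem.List.foldl_congr_mem
    intro acc kv hkv
    have := List.of_mem_filter hkv
    simp at this
    rw [if_pos this]
  have h2 : (d.items.filter (fun kv => decide (kv.2 < c))).foldl (fun d kv => d.erase kv.1) d
      = ((d.items.filter (fun kv => decide (kv.2 < c))).map (fun kv => kv.1)).foldl PySem.Dict.erase d := by
    rw [List.foldl_map]
  rw [h1, h2]
  have hitems := pv_foldl_erase_items ((d.items.filter (fun kv => decide (kv.2 < c))).map (fun kv => kv.1)) d
  have hkeys : (((d.items.filter (fun kv => decide (kv.2 < c))).map (fun kv => kv.1)).foldl PySem.Dict.erase d).keys.Nodup := by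
    rw [show ∀ (e : PySem.Dict String Int), e.keys = e.items.map (fun p => p.1) from fun _ => rfl]
    rw [hitems]
    exact List.Nodup.sublist (List.Sublist.map _ List.filter_sublist) hnd
  refine ⟨hkeys, ?_⟩
  intro t v
  rw [PySem.Dict.get?_eq_some_iff_mem_items _ t v hkeys]
  rw [hitems]
  rw [List.mem_filter]
  rw [← PySem.Dict.get?_eq_some_iff_mem_items d t v hnd]
  constructor
  · rintro ⟨hg, hnc⟩
    refine ⟨hg, ?_⟩
    intro hvc
    simp only [Bool.not_eq_eq_eq_not, Bool.not_true, List.contains_eq_mem, decide_eq_false_iff_not] at hnc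
    apply hnc
    apply List.mem_map.mpr
    refine ⟨(t, v), ?_, rfl⟩
    exact List.mem_filter.mpr ⟨PySem.Dict.mem_items_of_get?_eq_some d hg, by simpa using hvc⟩
  · rintro ⟨hg, hvc⟩
    refine ⟨hg, ?_⟩
    simp only [Bool.not_eq_eq_eq_not, Bool.not_true, List.contains_eq_mem, decide_eq_false_iff_not]
    intro hmem
    rcases List.mem_map.mp hmem with ⟨kv, hkvmem, hkv1⟩
    have hkvitems := List.of_mem_filter hkvmem
    simp at hkvitems
    have hkvd : kv ∈ d.items := List.mem_of_mem_filter hkvmem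
    have : d.get? kv.1 = some kv.2 := PySem.Dict.get?_of_mem_items d (by simpa using hkvd) hnd
    rw [hkv1] at this
    rw [hg] at this
    have : v = kv.2 := by injection this
    omega

-- from the invariant characterisation: size and values of the dict
theorem pv_sizeval (d : PySem.Dict String Int) (tks lows : List String) (F m : Nat)
    (hnd : d.keys.Nodup) (htks : tks.Nodup)
    (hchar : ∀ t v, d.get? t = some v ↔
      (t ∈ tks ∧ (pvWin lows F m).contains t = true ∧ v = ((pvLastO lows t m : Nat) : Int))) :
    d.size = (pvPres tks lows F m).length ∧
      d.values.Perm ((pvPres tks lows F m).map (fun t => ((pvLastO lows t m : Nat) : Int))) := by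
  have hpresnd : (pvPres tks lows F m).Nodup := List.Nodup.filter _ htks
  have hkeysPerm : d.keys.Perm (pvPres tks lows F m) := by
    rw [List.perm_ext_iff_of_nodup hnd hpresnd]
    intro t
    constructor
    · intro ht
      rcases Option.ne_none_iff_exists'.mp
        ((not_iff_not.mpr (PySem.Dict.get?_eq_none_iff_not_mem_keys d t)).mpr (by simpa using ht)) with ⟨v, hv⟩
      obtain ⟨h1, h2, _⟩ := (hchar t v).mp hv
      exact List.mem_filter.mpr ⟨h1, by simpa using h2⟩
    · intro ht
      rcases List.mem_filter.mp ht with ⟨h1, h2⟩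
      have : d.get? t = some ((pvLastO lows t m : Nat) : Int) :=
        (hchar t _).mpr ⟨h1, by simpa using h2, rfl⟩
      by_contra hk
      rw [(PySem.Dict.get?_eq_none_iff_not_mem_keys d t).mpr hk] at this
      simp at this
  constructor
  · rw [show d.size = d.keys.length from (List.length_map _).symm]
    exact hkeysPerm.length_eq
  · have hvals : d.values = d.keys.map (fun k => d.getD k 0) := PySem.Dict.values_eq_map_keys d hnd 0
    rw [hvals]
    have : (pvPres tks lows F m).map (fun k => d.getD k 0)
        = (pvPres tks lows F m).map (fun t => ((pvLastO lows t m : Nat) : Int)) := by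
      apply List.map_congr_left
      intro t ht
      rcases List.mem_filter.mp ht with ⟨h1, h2⟩
      have : d.get? t = some ((pvLastO lows t m : Nat) : Int) :=
        (hchar t _).mpr ⟨h1, by simpa using h2, rfl⟩
      simp [PySem.Dict.getD_eq_get?_getD, this]
    rw [← this]
    exact hkeysPerm.map _



-- one synchronised step of both loops preserves the invariant
theorem pv_step (tks : List String) (text : List String) (fs : Int) (hfs : 0 ≤ fs)
    (htks : tks.Nodup) (m : Nat) (hm : m < text.length)
    (sA : (Int × Int × Int) × PySem.Dict String Int)
    (sB : PySem.Dict String Int × Int × Int × Int)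
    (hInv : pvInv tks (pvLows text) fs m sA sB) :
    pvInv tks (pvLows text) fs (m+1)
      (pvStepA tks fs sA ((m : Int), text.getD m ""))
      (pvStepB tks fs text sB ((m : Int), text.getD m "")) := by
  obtain ⟨hnd, hget, hcnt, hdist, hb1, hb2, hbr⟩ := hInv
  have hlen : (pvLows text).length = text.length := by simp [pvLows]
  have hFfs : ((fs.toNat : Nat) : Int) = fs := Int.toNat_of_nonneg hfs
  have hxlow : (pvLows text).getD m "" = PySem.Str.lower (text.getD m "") := pv_lows_getD text m hm
  -- A-side pieces
  set x := PySem.Str.lower (text.getD m "") with hxdef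
  set d1 := if PySem.Set.contains tks x then sA.2.insert x ((m : Int)) else sA.2 with hd1def
  set d2 := (d1.items.filter (fun kv => decide (kv.2 < (m : Int) - fs))).foldl
      (fun d kv => if kv.2 < (m : Int) - fs then d.erase kv.1 else d) d1 with hd2def
  have hA : pvStepA tks fs sA ((m : Int), text.getD m "") =
      (if sA.1.2.1 < (d2.size : Int)
       then (((m : Int), (d2.size : Int), ((PySem.List.min? d2.values (fun v => v)).getD 0)), d2)
       else (sA.1, d2)) := rfl
  -- B-side pieces
  set s1 := (if PySem.Set.contains tks x then
      (sB.1.insert x (sB.1.getD x 0 + 1),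
       if (sB.1.insert x (sB.1.getD x 0 + 1)).getD x 0 == 1 then sB.2.1 + 1 else sB.2.1)
    else (sB.1, sB.2.1)) with hs1def
  set lj := PySem.Str.lower ((PySem.List.pyGet? text ((m : Int) - fs - 1)).getD "") with hljdef
  set s2 := (if 0 ≤ (m : Int) - fs - 1 then
      (if PySem.Set.contains tks lj then
        (s1.1.insert lj (s1.1.getD lj 0 - 1),
         if (s1.1.insert lj (s1.1.getD lj 0 - 1)).getD lj 0 == 0 then s1.2 - 1 else s1.2)
       else s1)
    else s1) with hs2def
  have hB : pvStepB tks fs text sB ((m : Int), text.getD m "") =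
      (if sB.2.2.2 < s2.2 then (s2.1, s2.2, (m : Int), s2.2) else (s2.1, s2.2, sB.2.2.1, sB.2.2.2)) := rfl
  -- dict invariants after insert
  have hd1nd : d1.keys.Nodup := by
    rw [hd1def]
    by_cases hc : PySem.Set.contains tks x = true
    · rw [if_pos hc]; exact PySem.Dict.nodup_keys_insert sA.2 x _ hnd
    · rw [if_neg hc]; exact hnd
  have hprune := pv_prune ((m : Int) - fs) d1 hd1nd
  have hd2nd : d2.keys.Nodup := hprune.1
  have hd2get : ∀ t v, d2.get? t = some v ↔ (d1.get? t = some v ∧ ¬(v < (m : Int) - fs)) := hprune.2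
  -- window step facts
  have htake : (pvLows text).take (m+1) = (pvLows text).take m ++ [x] := by
    rw [List.take_succ]
    congr 1
    rw [List.getElem?_eq_getElem (by omega : m < (pvLows text).length)]
    rw [← hxlow]
    simp [List.getD, List.getElem?_eq_getElem (by omega : m < (pvLows text).length)]
  have hwinx : x ∈ pvWin (pvLows text) fs.toNat (m+1) := by
    by_cases hle : m ≤ fs.toNat
    · rw [pv_win_succ_le (pvLows text) fs.toNat m (by omega) hle]
      rw [← hxlow]
      exact List.mem_append_right _ (by simp)
    · rw [(pv_win_succ_gt (pvLows text) fs.toNat m (by omega) (by omega)).1]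
      rw [← hxlow]
      exact List.mem_append_right _ (by simp)
  have hlastx : pvLastO (pvLows text) x (m+1) = m := by
    rw [pv_lastO_succ]
    rw [if_pos hxlow]
  have hlastne : ∀ t, t ≠ x → pvLastO (pvLows text) t (m+1) = pvLastO (pvLows text) t m := by
    intro t ht
    rw [pv_lastO_succ]
    rw [if_neg (by rw [hxlow]; exact fun hh => ht hh.symm)]
  -- the new characterisation of the dict
  have hchar' : ∀ t v, d2.get? t = some v ↔
      (t ∈ tks ∧ (pvWin (pvLows text) fs.toNat (m+1)).contains t = true ∧
        v = ((pvLastO (pvLows text) t (m+1) : Nat) : Int)) := by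
    intro t v
    rw [hd2get]
    by_cases htx : t = x
    · rw [htx]
      by_cases hc : PySem.Set.contains tks x = true
      · have hd1x : d1.get? x = some ((m : Int)) := by
          rw [hd1def, if_pos hc]; exact PySem.Dict.get?_insert_self _ _ _
        constructor
        · rintro ⟨hg, hnc⟩
          rw [hd1x] at hg
          have hv : v = (m : Int) := by injection hg with h; exact h.symm
          subst hv
          refine ⟨by simpa [PySem.Set.contains, List.contains_iff_mem] using hc,
            by simpa [List.contains_iff_mem] using hwinx, by rw [hlastx]⟩
        · rintro ⟨h1, h2, h3⟩
          rw [hlastx] at h3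
          subst h3
          exact ⟨hd1x, by omega⟩
      · have hd1t : d1 = sA.2 := by rw [hd1def, if_neg hc]
        constructor
        · rintro ⟨hg, _⟩
          rw [hd1t] at hg
          obtain ⟨h1, _, _⟩ := (hget x v).mp hg
          exact absurd (by simpa [PySem.Set.contains, List.contains_iff_mem] using h1) hc
        · rintro ⟨h1, _, _⟩
          exact absurd (by simpa [PySem.Set.contains, List.contains_iff_mem] using h1) hc
    · have hd1t : d1.get? t = sA.2.get? t := by
        rw [hd1def]
        by_cases hc : PySem.Set.contains tks x = true
        · rw [if_pos hc]; exact PySem.Dict.get?_insert_of_ne _ _ htx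
        · rw [if_neg hc]
      rw [hd1t, hget t v]
      have hw1 := pv_win_mem_iff (pvLows text) fs.toNat m t (by omega)
      have hw2 := pv_win_mem_iff (pvLows text) fs.toNat (m+1) t (by omega)
      rw [hlastne t htx, htake] at hw2
      rw [hlastne t htx, hw1, hw2]
      constructor
      · rintro ⟨⟨h1, ⟨hmem, hge⟩, h3⟩, h4⟩
        subst h3
        exact ⟨h1, ⟨List.mem_append_left _ hmem, by omega⟩, rfl⟩
      · rintro ⟨h1, ⟨hmem', hge'⟩, h3⟩
        subst h3
        have hmem : t ∈ (pvLows text).take m := by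
          rcases List.mem_append.mp hmem' with h | h
          · exact h
          · exact absurd (by simpa using h) htx
        exact ⟨⟨h1, ⟨hmem, by omega⟩, rfl⟩, by omega⟩
  -- the new counter characterisation and distinct count
  have hxmem : PySem.Set.contains tks x = true ↔ x ∈ tks := by
    simp [PySem.Set.contains, List.contains_iff_mem]
  have hlf : ∀ (l : List String) (p : String → Bool), (l.filter p).length = l.countP p :=
    fun l p => (List.countP_eq_length_filter).symm
  have h1cnt : ∀ t, t ∈ tks →
      s1.1.getD t 0 = (((pvWin (pvLows text) fs.toNat m ++ [x]).count t : Nat) : Int) := by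
    intro t ht
    by_cases hc : PySem.Set.contains tks x = true
    · rw [hs1def, if_pos hc]
      show (sB.1.insert x (sB.1.getD x 0 + 1)).getD t 0 = _
      rw [PySem.Dict.getD_insert]
      by_cases htx : t = x
      · rw [if_pos htx, htx, hcnt x (hxmem.mp hc), List.count_append]
        simp
      · rw [if_neg htx, hcnt t ht, List.count_append]
        have h0 : List.count t [x] = 0 := by simp [List.count_cons, Ne.symm htx]
        rw [h0]
        simp
    · rw [hs1def, if_neg hc]
      show sB.1.getD t 0 = _
      have htx : t ≠ x := fun h => hc (hxmem.mpr (h ▸ ht))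
      rw [hcnt t ht, List.count_append]
      have h0 : List.count t [x] = 0 := by simp [List.count_cons, Ne.symm htx]
      rw [h0]
      simp
  have h1dist : s1.2 = ((tks.filter
      (fun t => (pvWin (pvLows text) fs.toNat m ++ [x]).contains t)).length : Int) := by
    rw [hlf]
    by_cases hc : PySem.Set.contains tks x = true
    · rw [hs1def, if_pos hc]
      show (if (sB.1.insert x (sB.1.getD x 0 + 1)).getD x 0 == 1 then sB.2.1 + 1 else sB.2.1) = _
      rw [PySem.Dict.getD_insert, if_pos rfl, hcnt x (hxmem.mp hc)]
      have hdelta := pv_countP_delta tks (fun t => (pvWin (pvLows text) fs.toNat m).contains t)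
        (fun t => (pvWin (pvLows text) fs.toNat m ++ [x]).contains t) x htks (hxmem.mp hc)
        (by intro t _ htx; simp [htx])
      have hqx : ((pvWin (pvLows text) fs.toNat m ++ [x]).contains x) = true := by simp
      beta_reduce at hdelta
      rw [hqx, if_pos rfl] at hdelta
      have hpres : sB.2.1 = (((tks.countP (fun t => (pvWin (pvLows text) fs.toNat m).contains t)) : Nat) : Int) := by
        rw [hdist]
        show ((pvPres tks (pvLows text) fs.toNat m).length : Int) = _
        rw [show pvPres tks (pvLows text) fs.toNat m
          = tks.filter (fun t => (pvWin (pvLows text) fs.toNat m).contains t) from rfl, hlf]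
      by_cases hx0 : (pvWin (pvLows text) fs.toNat m).contains x = true
      · have hxpos : 0 < (pvWin (pvLows text) fs.toNat m).count x :=
          List.count_pos_iff.mpr (by simpa [List.contains_iff_mem] using hx0)
        rw [if_neg (by simp; omega)]
        rw [hx0, if_pos rfl] at hdelta
        omega
      · have hxnm : x ∉ pvWin (pvLows text) fs.toNat m := by
          intro hmem
          exact hx0 (by simpa [List.contains_iff_mem] using hmem)
        have hxz : (pvWin (pvLows text) fs.toNat m).count x = 0 := List.count_eq_zero.mpr hxnm
        rw [if_pos (by simp; omega)]
        rw [if_neg (by simpa using hx0)] at hdelta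
        omega
    · rw [hs1def, if_neg hc]
      show sB.2.1 = _
      rw [hdist]
      show ((pvPres tks (pvLows text) fs.toNat m).length : Int) = _
      rw [show pvPres tks (pvLows text) fs.toNat m
        = tks.filter (fun t => (pvWin (pvLows text) fs.toNat m).contains t) from rfl, hlf]
      congr 1
      apply List.countP_congr
      intro t ht
      have htx : t ≠ x := fun h => hc (hxmem.mpr (h ▸ ht))
      simp [htx]
  have hstep2 : (∀ t, t ∈ tks →
        s2.1.getD t 0 = (((pvWin (pvLows text) fs.toNat (m+1)).count t : Nat) : Int)) ∧
      s2.2 = ((pvPres tks (pvLows text) fs.toNat (m+1)).length : Int) := by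
    by_cases hj : 0 ≤ (m : Int) - fs - 1
    · have hFm : fs.toNat < m := by omega
      obtain ⟨hw1, hw2⟩ := pv_win_succ_gt (pvLows text) fs.toNat m (by omega) hFm
      have hmidcons : pvWin (pvLows text) fs.toNat m ++ [x]
          = (pvLows text).getD (m - (fs.toNat+1)) "" :: pvWin (pvLows text) fs.toNat (m+1) := by
        rw [hxlow] at hw1
        rw [hw1]
        conv_lhs => rw [hw2]
        simp
      have hljy : lj = (pvLows text).getD (m - (fs.toNat+1)) "" := by
        rw [hljdef]
        have hcast : (m : Int) - fs - 1 = ((m - (fs.toNat+1) : Nat) : Int) := by omega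
        rw [hcast, PySem.List.pyGet?_natCast]
        rw [List.getElem?_eq_getElem (by omega : m - (fs.toNat+1) < text.length)]
        rw [show (some (text[m - (fs.toNat+1)]'(by omega))).getD "" = text[m - (fs.toNat+1)]'(by omega) from rfl]
        rw [pv_lows_getD text (m - (fs.toNat+1)) (by omega)]
        rw [List.getD_eq_getElem text "" (by omega)]
      set y := (pvLows text).getD (m - (fs.toNat+1)) "" with hydef
      by_cases hyc : PySem.Set.contains tks lj = true
      · have hymem : y ∈ tks := by
          rw [← hljy]
          simpa [PySem.Set.contains, List.contains_iff_mem] using hyc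
        have hs2e : s2 = (s1.1.insert lj (s1.1.getD lj 0 - 1),
            if (s1.1.insert lj (s1.1.getD lj 0 - 1)).getD lj 0 == 0 then s1.2 - 1 else s1.2) := by
          rw [hs2def, if_pos hj, if_pos hyc]
        constructor
        · intro t ht
          rw [hs2e]
          show (s1.1.insert lj (s1.1.getD lj 0 - 1)).getD t 0 = _
          rw [PySem.Dict.getD_insert]
          by_cases hty : t = y
          · rw [if_pos (by rw [hljy, hty]), hljy, h1cnt y hymem, hmidcons]
            rw [hty]
            simp [List.count_cons]
          · rw [if_neg (by rw [hljy]; exact hty), h1cnt t ht, hmidcons]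
            simp [List.count_cons, Ne.symm hty]
        · rw [hs2e]
          show (if (s1.1.insert lj (s1.1.getD lj 0 - 1)).getD lj 0 == 0 then s1.2 - 1 else s1.2) = _
          rw [PySem.Dict.getD_insert, if_pos rfl, hljy, h1cnt y hymem]
          have hcnty : (pvWin (pvLows text) fs.toNat m ++ [x]).count y
              = (pvWin (pvLows text) fs.toNat (m+1)).count y + 1 := by
            rw [hmidcons]; simp [List.count_cons]
          have hdelta := pv_countP_delta tks
            (fun t => (pvWin (pvLows text) fs.toNat m ++ [x]).contains t)
            (fun t => (pvWin (pvLows text) fs.toNat (m+1)).contains t) y htks hymem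
            (by
              intro t _ hty
              rw [hmidcons]
              simp [Ne.symm hty, hty])
          have hpy : ((pvWin (pvLows text) fs.toNat m ++ [x]).contains y) = true := by
            rw [hmidcons]; simp
          beta_reduce at hdelta
          rw [hpy, if_pos rfl] at hdelta
          rw [h1dist]
          rw [show pvPres tks (pvLows text) fs.toNat (m+1)
            = tks.filter (fun t => (pvWin (pvLows text) fs.toNat (m+1)).contains t) from rfl]
          rw [hlf, hlf]
          by_cases hy0 : (pvWin (pvLows text) fs.toNat (m+1)).contains y = true
          · have hypos : 0 < (pvWin (pvLows text) fs.toNat (m+1)).count y :=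
              List.count_pos_iff.mpr (by simpa [List.contains_iff_mem] using hy0)
            rw [if_neg (by simp [hcnty]; omega)]
            rw [hy0, if_pos rfl] at hdelta
            omega
          · have hynm : y ∉ pvWin (pvLows text) fs.toNat (m+1) := by
              intro hmem
              exact hy0 (by simpa [List.contains_iff_mem] using hmem)
            have hyz : (pvWin (pvLows text) fs.toNat (m+1)).count y = 0 := List.count_eq_zero.mpr hynm
            rw [if_pos (by simp [hcnty, hyz])]
            rw [if_neg (by simpa using hy0)] at hdelta
            omega
      · have hs2e : s2 = s1 := by rw [hs2def, if_pos hj, if_neg hyc]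
        have hyn : y ∉ tks := by
          intro hy
          exact hyc (by rw [hljy]; simpa [PySem.Set.contains, List.contains_iff_mem] using hy)
        constructor
        · intro t ht
          have hty : t ≠ y := fun h => hyn (h ▸ ht)
          rw [hs2e, h1cnt t ht, hmidcons]
          simp [List.count_cons, Ne.symm hty]
        · rw [hs2e, h1dist]
          rw [show pvPres tks (pvLows text) fs.toNat (m+1)
            = tks.filter (fun t => (pvWin (pvLows text) fs.toNat (m+1)).contains t) from rfl]
          rw [hlf, hlf]
          congr 1
          apply List.countP_congr
          intro t ht
          have hty : t ≠ y := fun h => hyn (h ▸ ht)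
          rw [hmidcons]
          simp [Ne.symm hty, hty]
    · have hs2e : s2 = s1 := by rw [hs2def, if_neg hj]
      have hW' : pvWin (pvLows text) fs.toNat (m+1) = pvWin (pvLows text) fs.toNat m ++ [x] := by
        rw [pv_win_succ_le (pvLows text) fs.toNat m (by omega) (by omega), hxlow]
      constructor
      · intro t ht
        rw [hs2e, hW']
        exact h1cnt t ht
      · rw [hs2e]
        rw [show pvPres tks (pvLows text) fs.toNat (m+1)
          = tks.filter (fun t => (pvWin (pvLows text) fs.toNat (m+1)).contains t) from rfl, hW']
        exact h1dist
  have hcnt' := hstep2.1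
  have hdist' := hstep2.2
  -- sizes agree
  have hsv := pv_sizeval d2 tks (pvLows text) fs.toNat (m+1) hd2nd htks hchar'
  have hsize : (d2.size : Int) = s2.2 := by rw [hdist', hsv.1]
  have hmin : ((PySem.List.min? d2.values (fun v => v)).getD 0)
      = pvMinL tks (pvLows text) fs.toNat (m+1) := by
    have := pv_minD_perm _ _ 0 hsv.2
    simpa [pvMinD, pvMinL] using this
  -- assemble
  rw [hA, hB]
  have hcond : (sA.1.2.1 < (d2.size : Int)) ↔ (sB.2.2.2 < s2.2) := by
    rw [hb2, hsize]
  by_cases hu : sB.2.2.2 < s2.2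
  · rw [if_pos (hcond.mpr hu), if_pos hu]
    refine ⟨hd2nd, hchar', hcnt', hdist', rfl, by simpa using hsize, ?_⟩
    right
    refine ⟨m, by omega, rfl, by simpa using hdist', ?_, by simpa using hmin⟩
    have hb0 : 0 ≤ sB.2.2.2 := by
      rcases hbr with ⟨_, h0, _⟩ | ⟨mb, _, _, hbc, _, _⟩
      · omega
      · rw [hbc]; positivity
    have : 0 < s2.2 := by omega
    rw [hdist'] at this
    exact_mod_cast this
  · rw [if_neg (fun hh => hu (hcond.mp hh)), if_neg hu]
    refine ⟨hd2nd, hchar', hcnt', hdist', by simpa using hb1, by simpa using hb2, ?_⟩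
    rcases hbr with ⟨h1, h2, h3⟩ | ⟨mb, hmb, h1, h2, h3, h4⟩
    · left; exact ⟨h1, h2, h3⟩
    · right; exact ⟨mb, by omega, h1, h2, h3, h4⟩


-- the main simulation
theorem pv_main (tokens text : List String) (fs : Int) (hfs : 0 ≤ fs) (m : Nat) (hm : m ≤ text.length) :
    pvInv (PySem.Set.ofList (tokens.map PySem.Str.lower)) (pvLows text) fs m
      ((List.range m).foldl (fun st (j : Nat) => pvStepA (PySem.Set.ofList (tokens.map PySem.Str.lower)) fs st ((j : Int), text.getD j "")) ((-1, 0, -1), PySem.Dict.empty))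
      ((List.range m).foldl (fun st (j : Nat) => pvStepB (PySem.Set.ofList (tokens.map PySem.Str.lower)) fs text st ((j : Int), text.getD j "")) (PySem.Dict.empty, 0, -1, 0)) := by
  induction m with
  | zero =>
    refine ⟨by simp [PySem.Dict.empty], ?_, ?_, ?_, rfl, rfl, Or.inl ⟨rfl, rfl, rfl⟩⟩
    · intro t v
      simp [PySem.Dict.get?_empty, pvWin]
    · intro t _
      simp [PySem.Dict.getD_empty, pvWin]
    · simp [pvPres, pvWin]
  | succ m ih =>
    simp only [List.range_succ, List.foldl_append, List.foldl_cons, List.foldl_nil]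
    exact pv_step _ text fs hfs (PySem.Set.nodup_ofList _) m (by omega) _ _ (ih (by omega))



-- range(a, c, -1) as a mapped List.range
theorem pv_pyRange_neg_one (a c : Int) :
    PySem.List.pyRange a c (-1) = (List.range (a - c).toNat).map (fun (k : Nat) => a - (k : Int)) := by
  show (if (-1 : Int) = 0 then _ else _) = _
  rw [if_neg (by norm_num)]
  have h1 : ¬ ((0:Int) < -1) := by norm_num
  rw [if_neg h1]
  by_cases h : c < a
  · rw [if_pos h]
    have h2 : ((a - c + -(-1) - 1) / -(-1)) = a - c := by norm_num
    rw [h2]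
    apply List.map_congr_left
    intro k hk
    ring
  · rw [if_neg h]
    have h2 : (a - c).toNat = 0 := by omega
    simp [h2]

-- the backward scan computes the minimum last occurrence
theorem pv_scan (tokens text : List String) (fs : Int) (hfs : 0 ≤ fs) (bi : Nat) (hbi : bi < text.length)
    (hne : 0 < (pvPres (PySem.Set.ofList (tokens.map PySem.Str.lower)) (pvLows text) fs.toNat (bi+1)).length) :
    ((PySem.List.pyRange (bi : Int) ((if (bi : Int) - fs < 0 then 0 else (bi : Int) - fs) - 1) (-1)).foldl
        (pvScanStep (PySem.Set.ofList (tokens.map PySem.Str.lower)) text) (PySem.Set.empty, (bi : Int))).2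
      = pvMinL (PySem.Set.ofList (tokens.map PySem.Str.lower)) (pvLows text) fs.toNat (bi+1) := by
  set tks := PySem.Set.ofList (tokens.map PySem.Str.lower) with htksdef
  set lows := pvLows text with hlowsdef
  have hlen : lows.length = text.length := by simp [hlowsdef, pvLows]
  set lo := bi - fs.toNat with hlodef
  set K := bi - lo with hKdef
  have hlo : (if (bi : Int) - fs < 0 then 0 else (bi : Int) - fs) = ((lo : Nat) : Int) := by
    rw [hlodef]; split_ifs with h <;> omega
  rw [hlo, pv_pyRange_neg_one]
  have hKn : (((bi : Int)) - (((lo : Nat) : Int) - 1)).toNat = K + 1 := by omega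
  rw [hKn, List.foldl_map]
  have hsu : ∀ r : Nat, r ≤ K → (lows.take (bi+1)).drop (bi+1-(r+1))
      = lows.getD (bi - r) "" :: (lows.take (bi+1)).drop (bi+1-r) := by
    intro r hr
    have hlt : bi - r < (lows.take (bi+1)).length := by simp; omega
    rw [show bi+1-(r+1) = bi - r from by omega]
    rw [List.drop_eq_getElem_cons hlt]
    congr 1
    · rw [show (lows.take (bi+1))[bi - r]'hlt = lows[bi - r]'(by omega) from List.getElem_take]
      rw [← List.getD_eq_getElem lows "" (by omega)]
    · congr 1
      omega
  have hzeq : ∀ r : Nat, r ≤ K →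
      PySem.Str.lower ((PySem.List.pyGet? text ((bi : Int) - (r : Nat))).getD "") = lows.getD (bi - r) "" := by
    intro r hr
    have hcast : (bi : Int) - (r : Nat) = ((bi - r : Nat) : Int) := by omega
    rw [hcast, PySem.List.pyGet?_natCast]
    rw [List.getElem?_eq_getElem (by omega : bi - r < text.length)]
    rw [show (some (text[bi - r]'(by omega))).getD "" = text[bi - r]'(by omega) from rfl]
    rw [hlowsdef, pv_lows_getD text (bi - r) (by omega)]
    rw [List.getD_eq_getElem text "" (by omega)]
  have main : ∀ r : Nat, r ≤ K + 1 →
      (∀ t, t ∈ ((List.range r).foldl (fun x y => pvScanStep tks text x ((bi : Int) - (y : Nat))) (PySem.Set.empty, (bi : Int))).1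
        ↔ (t ∈ tks ∧ t ∈ (lows.take (bi+1)).drop (bi+1-r))) ∧
      ((List.range r).foldl (fun x y => pvScanStep tks text x ((bi : Int) - (y : Nat))) (PySem.Set.empty, (bi : Int))).2
        = pvMinD ((tks.filter (fun t => ((lows.take (bi+1)).drop (bi+1-r)).contains t)).map
            (fun t => ((pvLastO lows t (bi+1) : Nat) : Int))) ((bi : Int)) := by
    intro r
    induction r with
    | zero =>
      intro _
      have hsu0 : (lows.take (bi+1)).drop (bi+1-0) = ([] : List String) := by
        apply List.drop_eq_nil_of_le
        simp
      rw [hsu0]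
      constructor
      · intro t
        simp [PySem.Set.empty]
      · simp [pvMinD, PySem.List.min?]
    | succ r ih =>
      intro hr1
      have hrK : r ≤ K := by omega
      obtain ⟨ihm, ihv⟩ := ih (by omega)
      rw [List.range_succ, List.foldl_append, List.foldl_cons, List.foldl_nil]
      set st := (List.range r).foldl (fun x y => pvScanStep tks text x ((bi : Int) - (y : Nat))) (PySem.Set.empty, (bi : Int)) with hstdef
      rw [show pvScanStep tks text st ((bi : Int) - (r : Nat))
        = (if (PySem.Set.contains tks (PySem.Str.lower ((PySem.List.pyGet? text ((bi : Int) - (r : Nat))).getD ""))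
              && !(PySem.Set.contains st.1 (PySem.Str.lower ((PySem.List.pyGet? text ((bi : Int) - (r : Nat))).getD ""))))
           then (PySem.Set.add st.1 (PySem.Str.lower ((PySem.List.pyGet? text ((bi : Int) - (r : Nat))).getD "")), ((bi : Int) - (r : Nat)))
           else st) from rfl]
      rw [hzeq r hrK, hsu r hrK]
      set z := lows.getD (bi - r) "" with hzdef
      have hcont : ∀ (l : List String) (a : String), PySem.Set.contains l a = true ↔ a ∈ l := by
        intro l a; simp [PySem.Set.contains, List.contains_iff_mem]
      by_cases hzt : z ∈ tks
      · by_cases hzs : z ∈ (lows.take (bi+1)).drop (bi+1-r)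
        · have hzst : z ∈ st.1 := (ihm z).mpr ⟨hzt, hzs⟩
          have hc1 : PySem.Set.contains st.1 z = true := (hcont _ _).mpr hzst
          rw [if_neg (by rw [hc1]; simp)]
          constructor
          · intro t
            rw [ihm t]
            constructor
            · rintro ⟨h1, h2⟩; exact ⟨h1, List.mem_cons_of_mem _ h2⟩
            · rintro ⟨h1, h2⟩
              rcases List.mem_cons.mp h2 with rfl | h2'
              · exact ⟨h1, hzs⟩
              · exact ⟨h1, h2'⟩
          · rw [ihv]
            congr 2
            apply List.filter_congr
            intro t ht
            by_cases htz : t = z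
            · subst htz
              rw [show (List.drop (bi+1-r) (lows.take (bi+1))).contains z = true from (hcont _ _).mpr hzs]
              rw [show (z :: List.drop (bi+1-r) (lows.take (bi+1))).contains z = true from
                (hcont _ _).mpr List.mem_cons_self]
            · rw [List.contains_cons]
              rw [show (t == z) = false from by simp [htz]]
              simp
        · have hzst : z ∉ st.1 := fun hh => hzs ((ihm z).mp hh).2
          have hc1 : PySem.Set.contains tks z = true := (hcont _ _).mpr hzt
          have hc2 : PySem.Set.contains st.1 z = false :=
            (Bool.eq_false_iff).mpr (fun hh => hzst ((hcont _ _).mp hh))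
          rw [if_pos (by rw [hc1, hc2]; rfl)]
          have hztake : z ∈ lows.take (bi+1) := by
            apply List.mem_iff_getElem.mpr
            refine ⟨bi - r, by simp; omega, ?_⟩
            rw [show (lows.take (bi+1))[bi - r]'(by simp; omega) = lows[bi - r]'(by omega) from List.getElem_take]
            rw [hzdef, List.getD_eq_getElem lows "" (by omega)]
          have hlastz : pvLastO lows z (bi+1) = bi - r := by
            obtain ⟨hh1, hh2, hh3⟩ := pv_lastO_spec lows z (bi+1) hztake
            have hge : bi - r ≤ pvLastO lows z (bi+1) := by
              apply hh3 (bi - r) (by omega)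
              rw [hzdef]
            have hub : pvLastO lows z (bi+1) ≤ bi - r := by
              by_contra hh
              push_neg at hh
              exact hzs ((pv_drop_take_mem lows (bi+1) (bi+1-r) z (by omega)).mpr ⟨hztake, by omega⟩)
            omega
          constructor
          · intro t
            rw [show (PySem.Set.add st.1 z, ((bi : Int) - (r : Nat))).1 = PySem.Set.add st.1 z from rfl]
            rw [PySem.Set.mem_add, ihm t]
            constructor
            · rintro (⟨h1, h2⟩ | rfl)
              · exact ⟨h1, List.mem_cons_of_mem _ h2⟩
              · exact ⟨hzt, List.mem_cons_self⟩
            · rintro ⟨h1, h2⟩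
              rcases List.mem_cons.mp h2 with rfl | h2'
              · right; rfl
              · left; exact ⟨h1, h2'⟩
          · rw [show (PySem.Set.add st.1 z, ((bi : Int) - (r : Nat))).2 = ((bi : Int) - (r : Nat)) from rfl]
            symm
            apply pv_minD_eq_of_mem_of_le
            · apply List.mem_map.mpr
              refine ⟨z, ?_, by rw [hlastz]; omega⟩
              apply List.mem_filter.mpr
              exact ⟨hzt, by simp⟩
            · intro w hw
              rcases List.mem_map.mp hw with ⟨t, htf, rfl⟩
              rcases List.mem_filter.mp htf with ⟨ht1, ht2⟩
              have htmem : t ∈ z :: (lows.take (bi+1)).drop (bi+1-r) := by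
                simpa [List.contains_iff_mem] using ht2
              have : bi - r ≤ pvLastO lows t (bi+1) := by
                rcases List.mem_cons.mp htmem with rfl | h2'
                · omega
                · have := ((pv_drop_take_mem lows (bi+1) (bi+1-r) t (by omega)).mp h2').2
                  omega
              omega
      · have hc1 : PySem.Set.contains tks z = false :=
          (Bool.eq_false_iff).mpr (fun hh => hzt ((hcont _ _).mp hh))
        rw [if_neg (by rw [hc1]; simp)]
        constructor
        · intro t
          rw [ihm t]
          constructor
          · rintro ⟨h1, h2⟩; exact ⟨h1, List.mem_cons_of_mem _ h2⟩
          · rintro ⟨h1, h2⟩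
            rcases List.mem_cons.mp h2 with rfl | h2'
            · exact absurd h1 hzt
            · exact ⟨h1, h2'⟩
        · rw [ihv]
          congr 2
          apply List.filter_congr
          intro t ht
          have htz : t ≠ z := fun hh => hzt (hh ▸ ht)
          rw [List.contains_cons]
          rw [show (t == z) = false from by simp [htz]]
          simp
  have hfin := (main (K+1) le_rfl).2
  rw [hfin]
  have hwin : (lows.take (bi+1)).drop (bi+1-(K+1)) = pvWin lows fs.toNat (bi+1) := by
    rw [show pvWin lows fs.toNat (bi+1) = (lows.take (bi+1)).drop (bi+1-(fs.toNat+1)) from rfl]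
    rw [show bi + 1 - (K + 1) = bi + 1 - (fs.toNat + 1) from by omega]
  rw [hwin]
  have hne' : (tks.filter (fun t => (pvWin lows fs.toNat (bi+1)).contains t)).map
      (fun t => ((pvLastO lows t (bi+1) : Nat) : Int)) ≠ [] := by
    intro hh
    have hlh := congrArg List.length hh
    rw [List.length_map] at hlh
    rw [show (tks.filter (fun t => (pvWin lows fs.toNat (bi+1)).contains t))
      = pvPres tks lows fs.toNat (bi+1) from rfl] at hlh
    exact (Nat.pos_iff_ne_zero.mp hne) hlh
  rw [pv_minD_default _ _ 0 hne']
  rfl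


-- the negative-frame case: A's loop is a fixpoint
theorem pv_neg_fixpoint (tks : PySem.Set String) (fs : Int) (hfs : fs < 0) (l : List (Int × String)) :
    l.foldl (pvStepA tks fs) ((-1, 0, -1), PySem.Dict.empty) = ((-1, 0, -1), PySem.Dict.empty) := by
  induction l with
  | nil => rfl
  | cons iw l ih =>
    rw [List.foldl_cons]
    rw [show pvStepA tks fs ((-1, 0, -1), PySem.Dict.empty) iw = ((-1, 0, -1), PySem.Dict.empty) from ?_]
    · exact ih
    · unfold pvStepA
      by_cases hc : PySem.Set.contains tks (PySem.Str.lower iw.2) = true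
      · simp only [hc, if_true]
        have hins : (PySem.Dict.empty.insert (PySem.Str.lower iw.2) iw.1 : PySem.Dict String Int).items
            = [(PySem.Str.lower iw.2, iw.1)] := by rfl
        simp only [hins]
        have hcond : decide (iw.1 < iw.1 - fs) = true := by simp; omega
        simp only [List.filter_cons, List.filter_nil, hcond, if_true]
        simp only [List.foldl_cons, List.foldl_nil, if_pos (by omega : iw.1 < iw.1 - fs)]
        have : ((PySem.Dict.empty.insert (PySem.Str.lower iw.2) iw.1 : PySem.Dict String Int).erase
            (PySem.Str.lower iw.2)).items = [] := by
          rw [show ∀ (d : PySem.Dict String Int) k, (d.erase k).items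
              = d.items.filter (fun p => !(p.1 == k)) from fun _ _ => rfl]
          rw [hins]
          simp
        have hEq : ((PySem.Dict.empty.insert (PySem.Str.lower iw.2) iw.1 : PySem.Dict String Int).erase
            (PySem.Str.lower iw.2)) = PySem.Dict.empty := PySem.Dict.ext this
        rw [hEq]
        simp [PySem.Dict.size]
      · simp only [Bool.not_eq_true] at hc
        simp only [hc, Bool.false_eq_true, if_false]
        simp [PySem.Dict.size, PySem.Dict.empty]


-- ===== VERDICT (by name: the statement is the Claim_ definition above) =====
theorem find_snippet_spec : Claim_equal_find_snippet := by
  intro tokens text fs _hdom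
  show find_snippet tokens text fs = find_snippet_alt tokens text fs
  set tks := PySem.Set.ofList (tokens.map PySem.Str.lower) with htksdef
  set R := (PySem.List.enumerate text).foldl (pvStepA tks fs) ((-1, 0, -1), PySem.Dict.empty) with hRdef
  set S := (PySem.List.enumerate text).foldl (pvStepB tks fs text) (PySem.Dict.empty, 0, -1, 0) with hSdef
  have hAeq : find_snippet tokens text fs =
      (if R.1.1 != -1 then
        PySem.Str.join " " (PySem.List.slice text
          (some (PySem.Int.truncdiv (R.1.1 + R.1.2.2) 2 - PySem.Int.truncdiv fs 2))
          (some (PySem.Int.truncdiv (R.1.1 + R.1.2.2) 2 + PySem.Int.truncdiv fs 2)))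
      else "") := rfl
  have hBeq : find_snippet_alt tokens text fs =
      (if fs < 0 then "" else
       if S.2.2.1 == -1 then "" else
       PySem.Str.join " " (PySem.List.slice text
        (some (PySem.Int.floordiv (S.2.2.1 +
          ((PySem.List.pyRange S.2.2.1 ((if S.2.2.1 - fs < 0 then 0 else S.2.2.1 - fs) - 1) (-1)).foldl
            (pvScanStep tks text) (PySem.Set.empty, S.2.2.1)).2) 2 - PySem.Int.floordiv fs 2))
        (some (PySem.Int.floordiv (S.2.2.1 +
          ((PySem.List.pyRange S.2.2.1 ((if S.2.2.1 - fs < 0 then 0 else S.2.2.1 - fs) - 1) (-1)).foldl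
            (pvScanStep tks text) (PySem.Set.empty, S.2.2.1)).2) 2 + PySem.Int.floordiv fs 2)))) := rfl
  by_cases hfs : fs < 0
  · have hR : R = ((-1, 0, -1), PySem.Dict.empty) := pv_neg_fixpoint tks fs hfs _
    rw [hAeq, hBeq, hR, if_pos hfs]
    simp
  · have hfs' : 0 ≤ fs := by omega
    have hconv : ∀ {α : Type} (f : α → (Int × String) → α) (init : α),
        (PySem.List.enumerate text).foldl f init
          = (List.range text.length).foldl (fun st (j : Nat) => f st ((j : Int), text.getD j "")) init := by
      intro α f init
      rw [pv_enum_eq text 0, List.foldl_map]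
      apply PySem.List.foldl_congr_mem
      intro acc j _
      norm_num
    have hmain := pv_main tokens text fs hfs' text.length le_rfl
    rw [← hconv (pvStepA tks fs) ((-1, 0, -1), PySem.Dict.empty)] at hmain
    rw [← hconv (pvStepB tks fs text) (PySem.Dict.empty, 0, -1, 0)] at hmain
    obtain ⟨_, _, _, _, hb1, hb2, hbr⟩ := hmain
    rw [hAeq, hBeq, if_neg hfs]
    rcases hbr with ⟨hS1, _, hA3⟩ | ⟨mb, hmb, hS1, hS2, hS3, hA22⟩
    · rw [hb1, hS1]
      simp
    · rw [hb1, hS1, hA22]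
      rw [if_pos (by simp)]
      rw [if_neg (by simp)]
      have hscan := pv_scan tokens text fs hfs' mb hmb hS3
      rw [hscan]
      have hminpos : 0 ≤ pvMinL tks (pvLows text) fs.toNat (mb+1) := by
        apply pv_minD_nonneg
        intro y hy
        rcases List.mem_map.mp hy with ⟨t, _, rfl⟩
        positivity
      have htf : ∀ a : Int, 0 ≤ a → PySem.Int.truncdiv a 2 = PySem.Int.floordiv a 2 := by
        intro a ha
        rw [show PySem.Int.truncdiv a 2 = a.tdiv 2 from rfl]
        rw [PySem.Int.floordiv_eq_ediv_of_pos (by norm_num)]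
        exact Int.tdiv_eq_ediv_of_nonneg ha
      rw [htf _ (by positivity), htf fs hfs']
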